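-- pv_equiv track=rewrite | github.com/Mitclhd1/notificador-telegram-tmdb | notificador_lancamentos.py | format_episode_ranges
-- ===== SOURCE A (Python) =====
-- from itertools import groupby
-- from operator import itemgetter
--
-- def format_episode_ranges(episodes_by_season):
--     """Formata os números de episódios em SXX EXX-YY."""
--     parts = []
--     for season, episodes in sorted(episodes_by_season.items()):
--         if not episodes:
--             continue
--
--         season_str = f"S{str(season).zfill(2)}"
--         sorted_episodes = sorted(list(set(episodes)))
--
--         # Agrupa números consecutivos
--         ranges = []
--         for k, g in groupby(enumerate(sorted_episodes), lambda i_x: i_x[0] - i_x[1]):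
--             group = list(map(itemgetter(1), g))
--             if len(group) > 1:
--                 ranges.append(f"E{str(group[0]).zfill(2)}-{str(group[-1]).zfill(2)}")
--             else:
--                 ranges.append(f"E{str(group[0]).zfill(2)}")
--         parts.append(f"{season_str} {', '.join(ranges)}")
--     return ", ".join(parts)
-- ===== SOURCE B (Python) =====
-- def _season_part(season, episodes):
--     eps = set(episodes)
--     order = sorted(eps)
--     starts = [e for e in order if e - 1 not in eps]
--     ends = [e for e in order if e + 1 not in eps]
--     ranges = [f"E{str(s).zfill(2)}" if s == p else f"E{str(s).zfill(2)}-{str(p).zfill(2)}"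
--               for s, p in zip(starts, ends)]
--     return f"S{str(season).zfill(2)} " + ", ".join(ranges)
--
--
-- def format_episode_ranges(episodes_by_season):
--     """Formata os números de episódios em SXX EXX-YY."""
--     return ", ".join(_season_part(season, episodes)
--                      for season, episodes in sorted(episodes_by_season.items())
--                      if episodes)
-- ===== Notes on version B (the rewrite author's own statement) =====
-- stated objective: alternative
-- what changed: Replaces consecutive-run grouping (groupby on index-minus-value) with set-membership boundary detection: an episode is a range start iff e-1 is not in the set and a range end iff e+1 is not, and the sorted start/end lists are zipped into ranges; seasons are assembled by a comprehension instead of an accumulator loop.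
import Mathlib
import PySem

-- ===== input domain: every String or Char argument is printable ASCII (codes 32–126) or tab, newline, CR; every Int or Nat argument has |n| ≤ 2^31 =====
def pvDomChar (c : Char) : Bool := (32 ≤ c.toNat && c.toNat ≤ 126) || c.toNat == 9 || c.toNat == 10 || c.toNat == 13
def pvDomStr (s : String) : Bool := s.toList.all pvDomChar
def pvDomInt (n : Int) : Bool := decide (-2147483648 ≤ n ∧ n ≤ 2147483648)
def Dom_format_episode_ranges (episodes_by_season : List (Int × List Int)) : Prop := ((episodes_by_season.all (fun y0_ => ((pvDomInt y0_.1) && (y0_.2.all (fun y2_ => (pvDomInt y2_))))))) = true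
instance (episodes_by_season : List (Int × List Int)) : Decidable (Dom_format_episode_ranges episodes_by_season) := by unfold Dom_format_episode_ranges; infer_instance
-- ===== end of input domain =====

-- B replaces A's consecutive-run grouping (groupby on index minus value) by set-membership
-- boundary detection: e is a range start iff e-1 is not in the episode set, a range end iff
-- e+1 is not, and the sorted start/end lists are zipped; objective: alternative, same cost.

-- shared formatting helper: str(n).zfill(2) as a character list
def pvZ2 (n : Int) : List Char := PySem.Chars.zfill (PySem.Int.toChars n) 2

-- ===== PORT A =====
-- itertools.groupby(_, key = i - x): split into maximal runs of equal adjacent key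
def pvGroupby : List (Int × Int) → List (List (Int × Int))
  | [] => []
  | q :: l => match pvGroupby l with
    | [] => [[q]]
    | [] :: gs => [q] :: [] :: gs      -- unreachable: pvGroupby never produces an empty group
    | (r :: g) :: gs =>
        if q.1 - q.2 == r.1 - r.2 then (q :: r :: g) :: gs else [q] :: (r :: g) :: gs

-- one range string from a group: group = list(map(itemgetter(1), g)); group[0], group[-1]
-- (groups are nonempty, so Python's group[0]/group[-1] never raise; the default 0 is dead)
def pvFmtGroup (g : List (Int × Int)) : List Char :=
  let group := g.map (·.2)
  if group.length > 1 then
    'E' :: (pvZ2 (group.headD 0) ++ '-' :: pvZ2 (group.getLastD 0))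
  else
    'E' :: pvZ2 (group.headD 0)

-- the body of A's outer loop for one (season, episodes) item
def pvSeasonA (season : Int) (episodes : List Int) : List Char :=
  let sorted_episodes := PySem.List.sorted (PySem.Set.ofList episodes) (fun x => x) false
  let ranges := (pvGroupby (PySem.List.enumerate sorted_episodes 0)).map pvFmtGroup
  'S' :: pvZ2 season ++ ' ' :: PySem.Chars.join (", ".toList) ranges

def format_episode_ranges (episodes_by_season : List (Int × List Int)) : String :=
  let items := PySem.List.sorted episodes_by_season (fun p => p.1) false
  let parts := items.foldl
    (fun parts p => if !p.2.isEmpty then parts ++ [pvSeasonA p.1 p.2] else parts) []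
  String.ofList (PySem.Chars.join (", ".toList) parts)

-- ===== PORT B =====
-- the conditional expression inside the ranges comprehension
def pvFmtRange (sp : Int × Int) : List Char :=
  if sp.1 == sp.2 then 'E' :: pvZ2 sp.1 else 'E' :: (pvZ2 sp.1 ++ '-' :: pvZ2 sp.2)

-- _season_part(season, episodes)
def pvSeasonB (season : Int) (episodes : List Int) : List Char :=
  let eps := PySem.Set.ofList episodes
  let order := PySem.List.sorted eps (fun x => x) false
  let starts := order.filter (fun e => !(PySem.Set.contains eps (e - 1)))
  let ends := order.filter (fun e => !(PySem.Set.contains eps (e + 1)))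
  let ranges := (starts.zip ends).map pvFmtRange
  'S' :: pvZ2 season ++ ' ' :: PySem.Chars.join (", ".toList) ranges

def format_episode_ranges_alt (episodes_by_season : List (Int × List Int)) : String :=
  let items := PySem.List.sorted episodes_by_season (fun p => p.1) false
  String.ofList (PySem.Chars.join (", ".toList)
    ((items.filter (fun p => !p.2.isEmpty)).map (fun p => pvSeasonB p.1 p.2)))

-- ===== PRECONDITION & SPEC =====
def Spec_format_episode_ranges (episodes_by_season : List (Int × List Int)) (out : String) : Prop := out = format_episode_ranges_alt episodes_by_season
instance (episodes_by_season : List (Int × List Int)) (out : String) : Decidable (Spec_format_episode_ranges episodes_by_season out) := by unfold Spec_format_episode_ranges; infer_instance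

-- ===== CLAIM (what is proved, stated in full; the proofs are below) =====
def Claim_equal_format_episode_ranges : Prop := ∀ (episodes_by_season : List (Int × List Int)), Dom_format_episode_ranges episodes_by_season → Spec_format_episode_ranges episodes_by_season (format_episode_ranges episodes_by_season)

-- ===== LEMMAS AND PROOFS =====

-- proof-side intermediate: the run strings of a strictly increasing list, one scan
def pvClose (s p : Int) : List Char :=
  if s == p then 'E' :: pvZ2 s else 'E' :: (pvZ2 s ++ '-' :: pvZ2 p)

theorem pvFmtRange_eq (s p : Int) : pvFmtRange (s, p) = pvClose s p := rfl

def pvRuns (run_start prev : Int) : List Int → List (List Char)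
  | [] => [pvClose run_start prev]
  | e :: rest =>
      if e == prev + 1 then pvRuns run_start e rest
      else pvClose run_start prev :: pvRuns e e rest

-- ===== A side: groupby grouping equals pvRuns =====

-- the head group of pvGroupby starts with the first element
theorem pvGroupby_cons (l : List (Int × Int)) (q : Int × Int) :
    ∃ t gs, pvGroupby (q :: l) = (q :: t) :: gs := by
  cases h : pvGroupby l with
  | nil => exact ⟨[], [], by simp [pvGroupby, h]⟩
  | cons g gs =>
    cases g with
    | nil => exact ⟨[], [] :: gs, by simp [pvGroupby, h]⟩
    | cons r g' =>
      by_cases hk : q.1 - q.2 == r.1 - r.2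
      · exact ⟨r :: g', gs, by simp [pvGroupby, h, hk]⟩
      · exact ⟨[], (r :: g') :: gs, by simp [pvGroupby, h, hk]⟩

-- proof-side: map pvFmtGroup, but the first group conceptually extended by `extra`
-- earlier elements and starting at value s
def pvFmtAux (s : Int) (extra : Nat) : List (List (Int × Int)) → List (List Char)
  | [] => []
  | g :: gs =>
      (if g.length + extra > 1 then
        'E' :: (pvZ2 s ++ '-' :: pvZ2 ((g.map (·.2)).getLastD 0))
      else 'E' :: pvZ2 s) :: gs.map pvFmtGroup

theorem pvMain (xs : List Int) : ∀ (n s p : Int) (extra : Nat),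
    s ≤ p → (0 < extra ↔ s ≠ p) →
    pvFmtAux s extra (pvGroupby (PySem.List.enumerate (p :: xs) n)) = pvRuns s p xs := by
  induction xs with
  | nil =>
    intro n s p extra _ h2
    simp only [PySem.List.enumerate, pvGroupby, pvFmtAux, pvRuns, pvClose, List.map,
      List.length]
    by_cases hsp : s = p
    · have : ¬ (0 < extra) := by simp [h2, hsp]
      simp [hsp, Nat.not_lt.mp this]
    · have : 0 < extra := h2.mpr hsp
      simp [hsp, List.getLastD]
      omega
  | cons e rest ih =>
    intro n s p extra h1 h2
    rw [PySem.List.enumerate_cons, PySem.List.enumerate_cons]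
    obtain ⟨t, gs, hgb⟩ := pvGroupby_cons (PySem.List.enumerate rest (n + 1 + 1)) (n + 1, e)
    rw [show pvGroupby ((n, p) :: (n + 1, e) :: PySem.List.enumerate rest (n + 1 + 1)) =
      (match pvGroupby ((n + 1, e) :: PySem.List.enumerate rest (n + 1 + 1)) with
        | [] => [[(n, p)]]
        | [] :: gs => [(n, p)] :: [] :: gs
        | (r :: g) :: gs =>
            if (n : Int) - p == r.1 - r.2 then ((n, p) :: r :: g) :: gs
            else [(n, p)] :: (r :: g) :: gs) from rfl, hgb]
    by_cases he : e = p + 1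
    · have hk : ((n : Int) - p == (n + 1 : Int) - e) = true := by simp; omega
      have hcond : (e == p + 1) = true := by simp [he]
      have ihe := ih (n + 1) s e (extra + 1) (by omega) (by omega)
      rw [PySem.List.enumerate_cons, hgb] at ihe
      simp only [hk, if_true, pvFmtAux, List.map_cons, List.length_cons] at ihe ⊢
      simp only [pvRuns, hcond, if_true]
      rw [← ihe, if_pos (by omega), if_pos (by omega)]
      simp only [List.getLastD_cons]
    · have hk : ((n : Int) - p == (n + 1 : Int) - e) = false := by simp; omega
      have hcond : (e == p + 1) = false := by simp [he]
      have ihe := ih (n + 1) e e 0 le_rfl (by simp)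
      rw [PySem.List.enumerate_cons, hgb] at ihe
      simp only [hk, Bool.false_eq_true, if_false, pvFmtAux, List.map_cons,
        List.length_cons] at ihe ⊢
      simp only [pvRuns, hcond, Bool.false_eq_true, if_false]
      rw [← ihe]
      congr 1
      · -- the closed first group [(n, p)] equals pvClose s p
        simp only [List.map_nil, List.length_nil]
        rw [pvClose]
        by_cases hsp : s = p
        · have hex : ¬ 0 < extra := fun h => (h2.mp h) hsp
          rw [if_neg (by omega), if_pos (by simp [hsp])]
        · have hex : 0 < extra := h2.mpr hsp
          rw [if_pos (by omega), if_neg (by simp [hsp])]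
          simp [List.getLastD]
      · congr 1
        simp only [pvFmtGroup, List.map_cons, List.length_cons, List.length_map,
          List.headD_cons]

-- A's per-list ranges equal pvRuns
theorem pvRanges_eq (se : List Int) :
    (pvGroupby (PySem.List.enumerate se 0)).map pvFmtGroup =
      (match se with | [] => [] | x :: rest => pvRuns x x rest) := by
  cases se with
  | nil => simp [PySem.List.enumerate, pvGroupby]
  | cons x rest =>
    show (pvGroupby (PySem.List.enumerate (x :: rest) 0)).map pvFmtGroup = pvRuns x x rest
    have h := pvMain rest 0 x x 0 le_rfl (by simp)
    rw [← h, PySem.List.enumerate_cons] at *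
    obtain ⟨t, gs, hgb⟩ := pvGroupby_cons (PySem.List.enumerate rest (0 + 1)) (0, x)
    rw [hgb]
    simp only [pvFmtAux, List.map_cons]
    congr 1
    simp only [pvFmtGroup, List.map_cons, List.length_cons, List.length_map, List.headD_cons]
    split_ifs <;> rfl

-- ===== B side: membership boundary detection equals pvRuns =====

-- main induction: on a strictly increasing list p :: xs, with a run already open at s ≤ p,
-- the zipped boundary lists (first start replaced by s) produce exactly the run strings
theorem pvZipRuns (xs : List Int) : ∀ (s p : Int),
    (p :: xs).Pairwise (· < ·) → s ≤ p →
    (((s :: ((p :: xs).filter (fun e => !(decide ((e - 1) ∈ p :: xs)))).tail).zip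
      ((p :: xs).filter (fun e => !(decide ((e + 1) ∈ p :: xs))))).map pvFmtRange)
      = pvRuns s p xs := by
  induction xs with
  | nil =>
    intro s p _ _
    simp [pvRuns, pvFmtRange_eq, List.filter]
  | cons e rest ih =>
    intro s p hpw hsp
    have hpe : p < e := (List.pairwise_cons.mp hpw).1 e (by simp)
    have hall : ∀ f ∈ rest, e < f := (List.pairwise_cons.mp (List.pairwise_cons.mp hpw).2).1
    have hpw' : (e :: rest).Pairwise (· < ·) := (List.pairwise_cons.mp hpw).2
    -- p is always kept by the starts filter (p - 1 is below every element)
    have hps : (!(decide ((p - 1) ∈ p :: e :: rest))) = true := by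
      simp only [Bool.not_eq_eq_eq_not, Bool.not_true, decide_eq_false_iff_not, List.mem_cons]
      rintro (h | h | h)
      · omega
      · omega
      · have := hall _ h; omega
    -- for elements of rest, membership of f - 1 ignores the head p (f - 1 > p)
    have hstepR : ∀ f ∈ rest, (!(decide ((f - 1) ∈ p :: e :: rest)))
        = (!(decide ((f - 1) ∈ e :: rest))) := by
      intro f hf
      have hgt : e < f := hall _ hf
      simp only [List.mem_cons]
      congr 1
      simp only [decide_eq_decide]
      constructor
      · rintro (h1 | h1)
        · omega
        · exact h1
      · intro h1; exact Or.inr h1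
    -- for elements of e :: rest, membership of f + 1 ignores the head p (f + 1 > p)
    have hstep2 : ∀ f ∈ e :: rest, (!(decide ((f + 1) ∈ p :: e :: rest)))
        = (!(decide ((f + 1) ∈ e :: rest))) := by
      intro f hf
      have hfe : e ≤ f := by
        rcases List.mem_cons.mp hf with h | h
        · omega
        · have := hall _ h; omega
      simp only [List.mem_cons]
      congr 1
      simp only [decide_eq_decide]
      constructor
      · rintro (h1 | h1)
        · omega
        · exact h1
      · intro h1; exact Or.inr h1
    -- e is kept by the starts filter of the tail list (e is its minimum)
    have heKeep : (!(decide ((e - 1) ∈ e :: rest))) = true := by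
      simp only [Bool.not_eq_eq_eq_not, Bool.not_true, decide_eq_false_iff_not, List.mem_cons]
      rintro (h | h)
      · omega
      · have := hall _ h; omega
    by_cases he : e = p + 1
    · -- run continues: e is not a start, p is not an end
      have hes : (!(decide ((e - 1) ∈ p :: e :: rest))) = false := by
        simp [he, List.mem_cons]
      have hpe2 : (!(decide ((p + 1) ∈ p :: e :: rest))) = false := by
        simp [List.mem_cons, he.symm]
      have hS : (p :: e :: rest).filter (fun f => !(decide ((f - 1) ∈ p :: e :: rest)))
          = p :: rest.filter (fun f => !(decide ((f - 1) ∈ e :: rest))) := by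
        simp only [List.filter_cons, hps, hes, if_true, Bool.false_eq_true, if_false]
        rw [List.filter_congr hstepR]
      have hE : (p :: e :: rest).filter (fun f => !(decide ((f + 1) ∈ p :: e :: rest)))
          = (e :: rest).filter (fun f => !(decide ((f + 1) ∈ e :: rest))) := by
        simp only [List.filter_cons, hpe2, Bool.false_eq_true, if_false]
        rw [List.filter_congr (fun f hf => hstep2 f (by simp [hf])), hstep2 e (by simp)]
      have ihe := ih s e hpw' (by omega)
      have hS' : (e :: rest).filter (fun f => !(decide ((f - 1) ∈ e :: rest)))
          = e :: rest.filter (fun f => !(decide ((f - 1) ∈ e :: rest))) := by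
        simp only [List.filter_cons, heKeep, if_true]
      rw [hS', List.tail_cons] at ihe
      rw [hS, hE, List.tail_cons, pvRuns, if_pos (by simp [he]), ← ihe]
    · -- run breaks: e starts a new run, p ends the old one
      have hgap : p + 1 < e := by omega
      have hes : (!(decide ((e - 1) ∈ p :: e :: rest))) = true := by
        simp only [Bool.not_eq_eq_eq_not, Bool.not_true, decide_eq_false_iff_not,
          List.mem_cons]
        rintro (h | h | h)
        · omega
        · omega
        · have := hall _ h; omega
      have hpe2 : (!(decide ((p + 1) ∈ p :: e :: rest))) = true := by
        simp only [Bool.not_eq_eq_eq_not, Bool.not_true, decide_eq_false_iff_not,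
          List.mem_cons]
        rintro (h | h | h)
        · omega
        · omega
        · have := hall _ h; omega
      have hS : (p :: e :: rest).filter (fun f => !(decide ((f - 1) ∈ p :: e :: rest)))
          = p :: e :: rest.filter (fun f => !(decide ((f - 1) ∈ e :: rest))) := by
        simp only [List.filter_cons, hps, hes, if_true]
        rw [List.filter_congr hstepR]
      have hE : (p :: e :: rest).filter (fun f => !(decide ((f + 1) ∈ p :: e :: rest)))
          = p :: (e :: rest).filter (fun f => !(decide ((f + 1) ∈ e :: rest))) := by
        simp only [List.filter_cons, hpe2, if_true]
        congr 1
        rw [List.filter_congr (fun f hf => hstep2 f (by simp [hf])), hstep2 e (by simp)]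
      have ihe := ih e e hpw' le_rfl
      have hS' : (e :: rest).filter (fun f => !(decide ((f - 1) ∈ e :: rest)))
          = e :: rest.filter (fun f => !(decide ((f - 1) ∈ e :: rest))) := by
        simp only [List.filter_cons, heKeep, if_true]
      rw [hS', List.tail_cons] at ihe
      rw [hS, hE, List.tail_cons, List.zip_cons_cons, List.map_cons, ihe,
        pvRuns, if_neg (by simp; omega), pvFmtRange_eq]

-- B's per-list ranges equal pvRuns, for the actual sorted-set list
theorem pvRangesB_eq (episodes : List Int) :
    (let eps := PySem.Set.ofList episodes
     let order := PySem.List.sorted eps (fun x => x) false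
     ((order.filter (fun e => !(PySem.Set.contains eps (e - 1)))).zip
       (order.filter (fun e => !(PySem.Set.contains eps (e + 1))))).map pvFmtRange)
    = (match PySem.List.sorted (PySem.Set.ofList episodes) (fun x => x) false with
        | [] => [] | x :: rest => pvRuns x x rest) := by
  have hmem : ∀ a : Int, PySem.Set.contains (PySem.Set.ofList episodes) a
      = decide (a ∈ PySem.List.sorted (PySem.Set.ofList episodes) (fun x => x) false) := by
    intro a
    rw [Bool.eq_iff_iff]
    simp [PySem.List.mem_sorted]
  have hpw := PySem.List.sorted_ofList_pairwise_lt (xs := episodes)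
  simp only [hmem]
  cases hh : PySem.List.sorted (PySem.Set.ofList episodes) (fun x => x) false with
  | nil => simp
  | cons x rest =>
    rw [hh] at hpw
    have hall := (List.pairwise_cons.mp hpw).1
    have hxs : (!(decide ((x - 1) ∈ x :: rest))) = true := by
      simp only [Bool.not_eq_eq_eq_not, Bool.not_true, decide_eq_false_iff_not, List.mem_cons]
      rintro (h | h)
      · omega
      · have := hall _ h; omega
    have h := pvZipRuns rest x x hpw le_rfl
    rw [show ((x :: rest).filter (fun e => !(decide ((e - 1) ∈ x :: rest))))
        = x :: rest.filter (fun e => !(decide ((e - 1) ∈ x :: rest))) from by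
      simp only [List.filter_cons, hxs, if_true]] at h ⊢
    simpa using h

theorem pvSeason_eq (season : Int) (episodes : List Int) :
    pvSeasonA season episodes = pvSeasonB season episodes := by
  simp only [pvSeasonA, pvSeasonB, pvRanges_eq]
  rw [← pvRangesB_eq]

-- ===== VERDICT (by name: the statement is the Claim_ definition above) =====
theorem format_episode_ranges_spec : Claim_equal_format_episode_ranges := by
  intro l _
  unfold Spec_format_episode_ranges format_episode_ranges format_episode_ranges_alt
  simp only [PySem.List.foldl_append_if, List.nil_append, pvSeason_eq]
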